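-- pv_equiv track=rewrite | github.com/ada333/decentralized-AI-project | src/main.py | assign_layers
-- ===== SOURCE A (Python) =====
-- def assign_layers(num_layers: int, num_nodes: int) -> list[tuple[int, int]]:
--     """Distribute layers evenly across nodes. Last node gets the remainder."""
--     layers_per_node = num_layers // num_nodes
--     assignments = []
--
--     start = 0
--     for i in range(num_nodes):
--         end = start + layers_per_node
--         if i == num_nodes - 1:
--             end = num_layers
--         assignments.append((start, end))
--         start = end
--
--     return assignments
-- ===== SOURCE B (Python) =====
-- def assign_layers(num_layers: int, num_nodes: int) -> list[tuple[int, int]]: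
--     """Distribute layers evenly across nodes. Last node gets the remainder."""
--     layers_per_node = num_layers // num_nodes
--     return [
--         (i * layers_per_node,
--          num_layers if i == num_nodes - 1 else (i + 1) * layers_per_node)
--         for i in range(num_nodes)
--     ]
-- ===== Notes on version B (the rewrite author's own statement) =====
-- stated objective: simpler
-- what changed: Replaced the running start accumulator threaded between iterations with a closed-form per-index computation (start = i*layers_per_node), emitted as a single comprehension.
import Mathlib
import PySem

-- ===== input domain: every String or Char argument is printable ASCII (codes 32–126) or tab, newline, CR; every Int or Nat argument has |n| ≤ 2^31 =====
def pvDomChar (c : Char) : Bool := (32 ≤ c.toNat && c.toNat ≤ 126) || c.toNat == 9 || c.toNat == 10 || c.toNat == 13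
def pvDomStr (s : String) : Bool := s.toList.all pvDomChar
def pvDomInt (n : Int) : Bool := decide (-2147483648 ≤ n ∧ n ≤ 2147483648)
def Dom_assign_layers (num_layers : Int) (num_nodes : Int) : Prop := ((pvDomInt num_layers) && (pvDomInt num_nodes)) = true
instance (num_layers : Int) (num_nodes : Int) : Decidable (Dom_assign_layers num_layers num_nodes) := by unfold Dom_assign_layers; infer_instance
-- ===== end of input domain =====

-- B replaces A's running `start` accumulator with the closed form start = i*layers_per_node, per index (simpler decomposition).


-- ===== PORT A =====
-- literal port: fold over range(num_nodes) threading (start, assignments)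
def assign_layers (num_layers : Int) (num_nodes : Int) : List (Int × Int) :=
  let layers_per_node := PySem.Int.floordiv num_layers num_nodes
  let res := (PySem.List.pyRange 0 num_nodes 1).foldl
    (fun (st : Int × List (Int × Int)) i =>
      let start := st.1
      let e := start + layers_per_node
      let e := if i = num_nodes - 1 then num_layers else e
      (e, st.2 ++ [(start, e)]))
    (0, [])
  res.2

-- ===== PORT B =====
-- literal port of Source B: each node's range computed directly from its index
def assign_layers_alt (num_layers : Int) (num_nodes : Int) : List (Int × Int) :=
  let layers_per_node := PySem.Int.floordiv num_layers num_nodes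
  (PySem.List.pyRange 0 num_nodes 1).map
    (fun i => (i * layers_per_node,
               if i = num_nodes - 1 then num_layers else (i + 1) * layers_per_node))

-- ===== PRECONDITION & SPEC =====
-- Pre_ excludes num_nodes = 0, where Python A raises ZeroDivisionError (and B too).
def Pre_assign_layers (num_layers : Int) (num_nodes : Int) : Prop := num_nodes ≠ 0
instance (num_layers : Int) (num_nodes : Int) : Decidable (Pre_assign_layers num_layers num_nodes) := by unfold Pre_assign_layers; infer_instance
def pvWitness_assign_layers : Int × Int := (10, 3)

def Spec_assign_layers (num_layers : Int) (num_nodes : Int) (out : List (Int × Int)) : Prop := out = assign_layers_alt num_layers num_nodes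
instance (num_layers : Int) (num_nodes : Int) (out : List (Int × Int)) : Decidable (Spec_assign_layers num_layers num_nodes out) := by unfold Spec_assign_layers; infer_instance

-- ===== CLAIM (what is proved, stated in full; the proofs are below) =====
def Claim_equal_assign_layers : Prop := ∀ (num_layers : Int) (num_nodes : Int), Dom_assign_layers num_layers num_nodes → Pre_assign_layers num_layers num_nodes → Spec_assign_layers num_layers num_nodes (assign_layers num_layers num_nodes)

-- ===== LEMMAS AND PROOFS =====

-- On a prefix range(0, m) with (m:Int) ≤ c, the override branch (i = c) never fires and
-- the accumulated start after i iterations is i * lpn.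
theorem assign_layers_prefix (nl c lpn : Int) (m : Nat) (hm : (m : Int) ≤ c) :
    (PySem.List.pyRange 0 (m : Int) 1).foldl
      (fun (st : Int × List (Int × Int)) i =>
        (if i = c then nl else st.1 + lpn,
         st.2 ++ [(st.1, if i = c then nl else st.1 + lpn)]))
      (0, [])
    = ((m : Int) * lpn,
       (PySem.List.pyRange 0 (m : Int) 1).map (fun i => (i * lpn, (i + 1) * lpn))) := by
  induction m with
  | zero => simp [PySem.List.pyRange_one_eq_nil]
  | succ k ih =>
    have hk : (k : Int) ≤ c := by push_cast at hm ⊢; omega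
    have hsplit : PySem.List.pyRange 0 ((k : Int) + 1) 1
        = PySem.List.pyRange 0 (k : Int) 1 ++ [(k : Int)] :=
      PySem.List.pyRange_one_succ_right (by exact_mod_cast Int.natCast_nonneg k)
    have hne : (k : Int) ≠ c := by push_cast at hm; omega
    push_cast
    rw [hsplit, List.foldl_append, List.map_append, ih hk]
    simp [hne]
    ring

theorem assign_layers_spec : Claim_equal_assign_layers := by
  unfold Claim_equal_assign_layers
  intro nl nn _ _
  unfold Spec_assign_layers assign_layers assign_layers_alt
  dsimp only
  by_cases hpos : 0 < nn
  · -- nn ≥ 1 : split off the last index nn - 1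
    set lpn := PySem.Int.floordiv nl nn with hlpn
    have hsplit : PySem.List.pyRange 0 nn 1
        = PySem.List.pyRange 0 (nn - 1) 1 ++ [nn - 1] := by
      have := PySem.List.pyRange_one_succ_right (a := 0) (b := nn - 1) (by omega)
      simpa [sub_add_cancel] using this
    obtain ⟨m, hm⟩ : ∃ m : Nat, (m : Int) = nn - 1 :=
      ⟨(nn - 1).toNat, Int.toNat_of_nonneg (by omega)⟩
    rw [hsplit, ← hm, List.foldl_append, List.map_append,
      assign_layers_prefix nl (↑m) lpn m le_rfl]
    simp only [List.foldl_cons, List.foldl_nil, List.map_cons, List.map_nil]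
    congr 1
    exact List.map_congr_left (fun i hi => by
      have := (PySem.List.mem_pyRange_one).1 hi
      simp only [if_neg (by omega : i ≠ (m : Int))])
  · -- nn < 0 (nn ≠ 0 by Pre_): empty range on both sides
    simp [PySem.List.pyRange_one_eq_nil (by omega : nn ≤ 0)]
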